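-- pv_equiv track=rewrite | github.com/dimoha/pylibs | network/urls.py | delete_www
-- ===== SOURCE A (Python) =====
-- def delete_www(s):
-- 	s = s.strip()
-- 	while s.lower().startswith('www.'):
-- 		tmp = s[4:]
-- 		if '.' not in tmp:
-- 			return s
-- 		s = tmp
-- 	return s
-- ===== SOURCE B (Python) =====
-- def delete_www(s):
--     parts = s.strip().split('.')
--     i = 0
--     while i + 2 < len(parts) and parts[i].lower() == 'www':
--         i += 1
--     return '.'.join(parts[i:])
-- ===== Notes on version B (the rewrite author's own statement) =====
-- stated objective: idiomatic
-- what changed: B splits the stripped string on '.' once and drops leading 'www' components while at least two components remain, then joins back, instead of A's repeated case-insensitive prefix test plus slicing and substring search on the shrinking string.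
import Mathlib
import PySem

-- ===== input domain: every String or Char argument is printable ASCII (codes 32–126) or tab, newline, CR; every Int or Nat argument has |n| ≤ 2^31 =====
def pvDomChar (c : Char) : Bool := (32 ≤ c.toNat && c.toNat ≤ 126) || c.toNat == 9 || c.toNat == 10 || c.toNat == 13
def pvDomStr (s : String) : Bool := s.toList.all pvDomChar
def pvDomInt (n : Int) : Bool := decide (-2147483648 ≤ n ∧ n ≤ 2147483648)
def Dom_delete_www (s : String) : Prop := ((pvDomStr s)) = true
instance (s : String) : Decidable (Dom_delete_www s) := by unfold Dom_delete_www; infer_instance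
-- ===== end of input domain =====

-- B strips the string once, splits it on '.', drops leading 'www' components while at least two
-- components would remain, and joins the rest back — one split/join pass instead of repeated
-- prefix-test-and-slice on the string (objective: idiomatic; same asymptotic cost).

-- ===== PORT A =====
-- A's while loop: recursion on the current string, peeling "www." while a '.' survives.
def delWwwLoop (cs : List Char) : List Char :=
  if h : PySem.Chars.startswith (PySem.Chars.lower cs) ['w','w','w','.'] = true then
    let tmp := PySem.Chars.slice cs (some 4) none
    if PySem.Chars.isIn ['.'] tmp = false then cs
    else delWwwLoop tmp
  else cs
termination_by cs.length
decreasing_by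
  have h4 : 4 ≤ cs.length := by
    have hp := (PySem.Chars.startswith_iff _ _).mp h
    have := hp.length_le
    simpa [PySem.Chars.lower] using this
  simp only [PySem.Chars.slice_eq_listSlice]
  rw [show ((4 : Int)) = ((4 : Nat) : Int) by norm_num, PySem.List.slice_from_natCast]
  simp
  omega

def delete_www (s : String) : String :=
  String.ofList (delWwwLoop (PySem.Chars.strip s.toList))

-- ===== PORT B =====
-- B's index loop 'while i + 2 < len(parts) and parts[i].lower() == "www": i += 1' followed by
-- '.'.join(parts[i:]), as structural recursion on the part list (advancing i = dropping the head).
def skipWww : List (List Char) → List (List Char)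
  | [] => []
  | p :: rest =>
    if 2 ≤ rest.length ∧ PySem.Chars.lower p = ['w','w','w'] then skipWww rest
    else p :: rest

def delete_www_alt (s : String) : String :=
  String.ofList (PySem.Chars.join ['.']
    (skipWww (PySem.Chars.splitOn (PySem.Chars.strip s.toList) ['.'])))

-- ===== PRECONDITION & SPEC =====
def Spec_delete_www (s : String) (out : String) : Prop := out = delete_www_alt s
instance (s : String) (out : String) : Decidable (Spec_delete_www s out) := by unfold Spec_delete_www; infer_instance

-- ===== CLAIM (what is proved, stated in full; the proofs are below) =====
def Claim_equal_delete_www : Prop := ∀ (s : String), Dom_delete_www s → Spec_delete_www s (delete_www s)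

-- ===== LEMMAS AND PROOFS =====

theorem modifyHead_fun_id (l : List (List Char)) : List.modifyHead (fun x => x) l = l := by
  cases l <;> simp

-- PySem's fuelled splitOn by a single '.' is Lean's List.splitOn '.'.
theorem go_spec : ∀ (fuel : Nat) (l cur : List Char) (acc : List (List Char)), l.length ≤ fuel →
    PySem.Chars.splitOn.go ['.'] fuel l cur acc =
      acc.reverse ++ (l.splitOn '.').modifyHead (cur.reverse ++ ·) := by
  intro fuel
  induction fuel with
  | zero =>
    intro l cur acc hl
    have : l = [] := by cases l <;> simp_all
    subst this
    simp [PySem.Chars.splitOn.go, List.splitOn]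
  | succ f ih =>
    intro l cur acc hl
    cases l with
    | nil => simp [PySem.Chars.splitOn.go, List.splitOn]
    | cons c rest =>
      by_cases hc : c = '.'
      · subst hc
        have hstep : PySem.Chars.splitOn.go ['.'] (f+1) ('.' :: rest) cur acc =
            PySem.Chars.splitOn.go ['.'] f rest [] (cur.reverse :: acc) := by
          simp [PySem.Chars.splitOn.go, List.isPrefixOf]
        rw [hstep, ih rest [] (cur.reverse :: acc) (by simpa using Nat.lt_succ_iff.mp (by simpa using hl))]
        simp only [List.splitOn, List.splitOnP_cons]
        simp [modifyHead_fun_id]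
      · have hc' : ¬ ('.' = c) := fun e => hc e.symm
        have hstep : PySem.Chars.splitOn.go ['.'] (f+1) (c :: rest) cur acc =
            PySem.Chars.splitOn.go ['.'] f rest (c :: cur) acc := by
          simp [PySem.Chars.splitOn.go, List.isPrefixOf, hc']
        rw [hstep, ih rest (c :: cur) acc (by simpa using Nat.lt_succ_iff.mp (by simpa using hl))]
        have hsplit : (c :: rest).splitOn '.' = (rest.splitOn '.').modifyHead (List.cons c) := by
          simp [List.splitOn, List.splitOnP_cons, hc]
        rw [hsplit, List.modifyHead_modifyHead]
        congr 2
        funext x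
        simp

theorem splitOn_dot_eq (l : List Char) :
    PySem.Chars.splitOn l ['.'] = l.splitOn '.' := by
  have h := go_spec (l.length + 1) l [] [] (by omega)
  simp only [List.reverse_nil, List.nil_append] at h
  rw [modifyHead_fun_id] at h
  simpa [PySem.Chars.splitOn] using h

-- joining the split back reproduces the string
theorem join_splitOn_dot (t : List Char) :
    PySem.Chars.join ['.'] (t.splitOn '.') = t := by
  simpa [PySem.Chars.join] using List.intercalate_splitOn t '.'

-- every string is either dot-free (one part) or first-part ++ '.' ++ rest
theorem splitDecomp (t : List Char) :
    (t.splitOn '.' = [t] ∧ ('.' : Char) ∉ t) ∨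
    (∃ p rest, ('.' : Char) ∉ p ∧ t = p ++ '.' :: rest ∧
      t.splitOn '.' = p :: rest.splitOn '.') := by
  induction t with
  | nil => left; simp [List.splitOn]
  | cons c t ih =>
    by_cases hc : c = '.'
    · subst hc
      right
      exact ⟨[], t, by simp, by simp, by simp [List.splitOn, List.splitOnP_cons]⟩
    · rcases ih with ⟨h1, h2⟩ | ⟨p, rest, hp, ht, hs⟩
      · left
        have h1' : List.splitOnP (fun x => x == '.') t = [t] := by simpa [List.splitOn] using h1
        refine ⟨?_, by simp [h2]; exact fun e => hc e.symm⟩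
        simp [List.splitOn, List.splitOnP_cons, hc, h1']
      · right
        refine ⟨c :: p, rest, by simp [hp]; exact fun e => hc e.symm, by simp [ht], ?_⟩
        have hs' : List.splitOnP (fun x => x == '.') t = p :: List.splitOn '.' rest := by
          simpa [List.splitOn] using hs
        simp [List.splitOn, List.splitOnP_cons, hc, hs']

theorem lowerChar_eq_dot_iff (u : Char) : PySem.Chars.lowerChar u = '.' ↔ u = '.' := by
  constructor
  · intro h
    unfold PySem.Chars.lowerChar at h
    split_ifs at h with hu
    · exfalso
      simp [PySem.Chars.isupper] at hu
      obtain ⟨h1, h2⟩ := hu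
      rw [Char.le_def, UInt32.le_iff_toNat_le] at h1 h2
      have hA : ('A' : Char).val.toNat = 65 := by decide
      have hZ : ('Z' : Char).val.toNat = 90 := by decide
      have ht := congrArg Char.toNat h
      rw [Char.toNat_ofNat] at ht
      have hval : Nat.isValidChar (u.toNat + 32) := by
        constructor; unfold Char.toNat at *; omega
      simp [hval] at ht
      have hdot : ('.' : Char).toNat = 46 := by decide
      unfold Char.toNat at *
      omega
    · exact h
  · intro h; subst h; decide

-- '.' is in l  iff  PySem's 'in' says so
theorem isIn_dot_iff (l : List Char) : PySem.Chars.isIn ['.'] l = true ↔ ('.' : Char) ∈ l := by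
  rw [PySem.Chars.isIn_iff_infix]
  constructor
  · intro h; exact h.subset (List.mem_singleton_self _)
  · intro h
    obtain ⟨s, t, rfl⟩ := List.append_of_mem h
    exact ⟨s, t, by simp⟩

-- the loop guard of A, characterised structurally
theorem startswith_char (t : List Char) :
    PySem.Chars.startswith (PySem.Chars.lower t) ['w','w','w','.'] = true ↔
    ∃ a b c rest, t = a :: b :: c :: '.' :: rest ∧
      PySem.Chars.lowerChar a = 'w' ∧ PySem.Chars.lowerChar b = 'w' ∧
      PySem.Chars.lowerChar c = 'w' := by
  rw [PySem.Chars.startswith_iff]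
  constructor
  · intro h
    obtain ⟨u, hu⟩ := h
    match t, hu with
    | [], hu => simp [PySem.Chars.lower] at hu
    | [a], hu => simp [PySem.Chars.lower] at hu
    | [a,b], hu => simp [PySem.Chars.lower] at hu
    | [a,b,c], hu => simp [PySem.Chars.lower] at hu
    | a :: b :: c :: d :: rest, hu =>
      simp [PySem.Chars.lower] at hu
      obtain ⟨ha, hb, hcc, hd, -⟩ := hu
      exact ⟨a, b, c, rest, by rw [(lowerChar_eq_dot_iff d).mp hd.symm], ha.symm, hb.symm, hcc.symm⟩
  · rintro ⟨a, b, c, rest, ht, ha, hb, hcc⟩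
    subst ht
    refine ⟨PySem.Chars.lower rest, ?_⟩
    simp [PySem.Chars.lower, ha, hb, hcc]
    decide

-- main loop correspondence: A's peeling loop equals join ∘ skipWww ∘ split
theorem loop_eq : ∀ (n : Nat) (t : List Char), t.length ≤ n →
    delWwwLoop t = PySem.Chars.join ['.'] (skipWww (t.splitOn '.')) := by
  intro n
  induction n with
  | zero =>
    intro t ht
    have : t = [] := by cases t <;> simp_all
    subst this
    rw [delWwwLoop]
    simp [show PySem.Chars.startswith (PySem.Chars.lower []) ['w','w','w','.'] = false from by decide,
      List.splitOn, skipWww, PySem.Chars.join]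
    decide
  | succ n ih =>
    intro t ht
    by_cases hs : PySem.Chars.startswith (PySem.Chars.lower t) ['w','w','w','.'] = true
    · obtain ⟨a, b, c, rest, hteq, ha, hb, hcc⟩ := (startswith_char t).mp hs
      have hane : ¬ (a = '.') := fun e => by subst e; exact absurd ha (by decide)
      have hbne : ¬ (b = '.') := fun e => by subst e; exact absurd hb (by decide)
      have hcne : ¬ (c = '.') := fun e => by subst e; exact absurd hcc (by decide)
      subst hteq
      have hsplit : (a::b::c::'.'::rest).splitOn '.' = [a,b,c] :: rest.splitOn '.' := by
        simp [List.splitOn, List.splitOnP_cons, hane, hbne, hcne]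
      have htmp : PySem.Chars.slice (a::b::c::'.'::rest) (some 4) none = rest := by
        simp only [PySem.Chars.slice_eq_listSlice]
        rw [show ((4 : Int)) = ((4 : Nat) : Int) by norm_num, PySem.List.slice_from_natCast]
        rfl
      rw [delWwwLoop]
      simp only [hs, htmp, dite_true]
      rw [hsplit]
      by_cases hdot : PySem.Chars.isIn ['.'] rest = false
      · have hnm : ('.' : Char) ∉ rest := fun hm => by
          rw [(isIn_dot_iff rest).mpr hm] at hdot; simp at hdot
        have hrsplit : rest.splitOn '.' = [rest] := by
          rcases splitDecomp rest with ⟨h1, -⟩ | ⟨p, r, -, hre, -⟩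
          · exact h1
          · exact absurd (by rw [hre]; simp : ('.' : Char) ∈ rest) hnm
        rw [if_pos hdot, hrsplit]
        have hskip : skipWww ([a,b,c] :: [rest]) = [a,b,c] :: [rest] := by
          simp [skipWww]
        rw [hskip, ← hrsplit, ← hsplit, join_splitOn_dot]
      · have hdott : PySem.Chars.isIn ['.'] rest = true := by
          cases h' : PySem.Chars.isIn ['.'] rest
          · exact absurd h' hdot
          · rfl
        have hmem : ('.' : Char) ∈ rest := (isIn_dot_iff rest).mp hdott
        have hlen2 : 2 ≤ (rest.splitOn '.').length := by
          rcases splitDecomp rest with ⟨-, h2⟩ | ⟨p, r, -, -, hsp⟩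
          · exact absurd hmem h2
          · rw [hsp]
            have := List.splitOnP_ne_nil (fun x => x == '.') r
            simp only [List.splitOn] at *
            cases h' : List.splitOnP (fun x => x == '.') r
            · exact absurd h' this
            · simp
        rw [if_neg hdot]
        have hlower : PySem.Chars.lower [a,b,c] = ['w','w','w'] := by
          simp [PySem.Chars.lower, ha, hb, hcc]
        have hskip : skipWww ([a,b,c] :: rest.splitOn '.') = skipWww (rest.splitOn '.') := by
          rw [skipWww]
          rw [if_pos ⟨hlen2, hlower⟩]
        rw [hskip]
        exact ih rest (by simp at ht; omega)
    · rw [delWwwLoop]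
      rw [dif_neg hs]
      rcases splitDecomp t with ⟨h1, -⟩ | ⟨p, rest, hp, hteq, hsp⟩
      · rw [h1]
        have : skipWww [t] = [t] := by simp [skipWww]
        rw [this, ← h1, join_splitOn_dot]
      · have hguard : ¬ (2 ≤ (rest.splitOn '.').length ∧ PySem.Chars.lower p = ['w','w','w']) := by
          rintro ⟨-, hlp⟩
          apply hs
          have hplen : p.length = 3 := by
            have := congrArg List.length hlp
            simpa [PySem.Chars.lower] using this
          obtain ⟨a, b, c, rfl⟩ := List.length_eq_three.mp hplen
          simp [PySem.Chars.lower] at hlp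
          obtain ⟨ha, hb, hcc⟩ := hlp
          exact (startswith_char t).mpr ⟨a, b, c, rest, by simpa using hteq, ha, hb, hcc⟩
        rw [hsp]
        have : skipWww (p :: rest.splitOn '.') = p :: rest.splitOn '.' := by
          rw [skipWww, if_neg hguard]
        rw [this, ← hsp, join_splitOn_dot]

theorem delete_www_eq (s : String) : delete_www s = delete_www_alt s := by
  unfold delete_www delete_www_alt
  rw [splitOn_dot_eq, loop_eq (PySem.Chars.strip s.toList).length _ le_rfl]

-- ===== VERDICT (by name: the statement is the Claim_ definition above) =====
theorem delete_www_spec : Claim_equal_delete_www := by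
  intro s _
  unfold Spec_delete_www
  exact delete_www_eq s
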